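-- pv_equiv track=rewrite | github.com/benczejrobert/auto-mix | test-mix-console.py | _create_all_proc_vars_combinations
-- ===== SOURCE A (Python) =====
-- def _create_all_proc_vars_combinations(dict_proc_vars_multiple_filter_type_names, capv_root_filename,
--                                        start_index=0,
--                                        end_index=None,
--                                        cr_proc_number_of_filters=None):
--
--     # TODO check if combinations contain all the 5 filters and no repeated filters - it seems that it does
--     #  contain all the filters - but i will keep this to do for further testing @BR20240311
--
--     """
--     This function takes a dict of all possible filter settings and creates all possible combinations of them.
--     One file name corresponds to a proc var.
--     :param cr_proc_number_of_filters: If not None, this restricts the possible combinations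
--                                 to the subset containing exactly number_of_filters filters
--     :param dict_proc_vars_multiple_filter_type_names:  dict of all possible filter settings - values for
--                                 the filter parameters along with the filter type names
--                                 example: {'high_pass': [{'cutoff': 100, 'resonance': 2}],
--                                           'low_shelf': [{'cutoff': 200, 'resonance': 2, 'dbgain': -12},
--                                                       {'cutoff': 200, 'resonance': 2, 'dbgain': 0},
--                                                       {'cutoff': 200, 'resonance': 2, 'dbgain': 12}],
--                                            'peak1': [{'center': 8000, 'resonance': 2, 'dbgain': -12},
--                                                      {'center': 8000, 'resonance': 2, 'dbgain': 0},
--                                                      {'center': 8000, 'resonance': 2, 'dbgain': 12}],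
--                                            'peak2': [{'center': 1000, 'resonance': 2, 'dbgain': -40}],
--                                            ...
--                                           }
--     :param capv_root_filename: the name of the file that will be saved after processing
--     :param start_index: the start index of the file and of the processing variant (can be used for parallelization)
--     :param end_index: the end index of the file and of the processing variant (can be used for parallelization)
--     :return: dict of all possible combinations of filter settings for multiple output file names
--     {'fname_[no].wav': {'filter_type(s)': {'param(s)': value(s), ...}, ...}, ...}
--     """
--
--     list_all_proc_vars_combinations = []
--
--     def backtrack(depth, input_dict):
--         keys = list(input_dict.keys())
--         result = []
--
--         def recursive_backtrack(index, current_combination):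
--             if len(current_combination) == depth:
--                 result.append(current_combination.copy())
--                 return
--
--             for j in range(index, len(keys)):
--                 current_key = keys[j]
--                 for element in input_dict[current_key]:
--                     # if element not in current_combination.values():
--                     # TODO this^ "if" sometimes removes valid combinations - falsely rejects combinations
--                     #  that are NOT YET in the output - IDK if this "to do" was addressed or what it was about
--                     current_combination[current_key] = element
--                     recursive_backtrack(j + 1, current_combination)
--                     del current_combination[current_key]
--
--         recursive_backtrack(0, {})
--
--         return result
--
--     in_dict_keys = list(dict_proc_vars_multiple_filter_type_names.keys())
--     if cr_proc_number_of_filters is None: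
--         for crt_depth in range(len(in_dict_keys)):
--             output = backtrack(crt_depth + 1, dict_proc_vars_multiple_filter_type_names)
--             list_all_proc_vars_combinations.extend(output)
--     else:
--         output = backtrack(cr_proc_number_of_filters, dict_proc_vars_multiple_filter_type_names)
--         list_all_proc_vars_combinations.extend(output)
--     dict_all_proc_vars_combinations = {}
--     if end_index is None:
--         end_index = start_index + len(list_all_proc_vars_combinations)
--     for i in range(start_index, end_index):   # TODO maybe add trailing zeros to the index - like 0001, 0002, etc
--         dict_all_proc_vars_combinations[f"{capv_root_filename}_{start_index + i}.wav"] = (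
--             list_all_proc_vars_combinations)[i - start_index]
--     return dict_all_proc_vars_combinations
-- ===== SOURCE B (Python) =====
-- def _create_all_proc_vars_combinations(dict_proc_vars_multiple_filter_type_names, capv_root_filename,
--                                        start_index=0,
--                                        end_index=None,
--                                        cr_proc_number_of_filters=None):
--     # Iterative subset-product enumeration instead of per-depth recursive backtracking:
--     # one backwards fold builds every combination (capped at the requested size) in
--     # decision-lexicographic order, one pass buckets them by size, and the buckets are
--     # concatenated in size order.
--     items = list(dict_proc_vars_multiple_filter_type_names.items())
--     cap = len(items) if cr_proc_number_of_filters is None else cr_proc_number_of_filters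
--     combos = [{}]
--     for key, vals in reversed(items):
--         combos = [{key: e, **t} for e in vals for t in combos if len(t) < cap] + combos
--     by_size = {}
--     for c in combos:
--         by_size.setdefault(len(c), []).append(c)
--     if cr_proc_number_of_filters is None:
--         flat = []
--         for size in range(1, len(items) + 1):
--             flat.extend(by_size.get(size, []))
--     else:
--         flat = by_size.get(cr_proc_number_of_filters, [])
--     if end_index is None:
--         end_index = start_index + len(flat)
--     result = {}
--     for i in range(start_index, end_index):
--         result[f"{capv_root_filename}_{start_index + i}.wav"] = flat[i - start_index]
--     return result
-- ===== Notes on version B (the rewrite author's own statement) =====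
-- stated objective: alternative
-- what changed: The nested recursive backtracking re-run once per depth is replaced by a single iterative backwards fold that builds all filter combinations (up to the requested size cap) at once in the same decision-lexicographic order, followed by a one-pass bucketing by size; the end_index defaulting and naming loop are kept verbatim.
import Mathlib
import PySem

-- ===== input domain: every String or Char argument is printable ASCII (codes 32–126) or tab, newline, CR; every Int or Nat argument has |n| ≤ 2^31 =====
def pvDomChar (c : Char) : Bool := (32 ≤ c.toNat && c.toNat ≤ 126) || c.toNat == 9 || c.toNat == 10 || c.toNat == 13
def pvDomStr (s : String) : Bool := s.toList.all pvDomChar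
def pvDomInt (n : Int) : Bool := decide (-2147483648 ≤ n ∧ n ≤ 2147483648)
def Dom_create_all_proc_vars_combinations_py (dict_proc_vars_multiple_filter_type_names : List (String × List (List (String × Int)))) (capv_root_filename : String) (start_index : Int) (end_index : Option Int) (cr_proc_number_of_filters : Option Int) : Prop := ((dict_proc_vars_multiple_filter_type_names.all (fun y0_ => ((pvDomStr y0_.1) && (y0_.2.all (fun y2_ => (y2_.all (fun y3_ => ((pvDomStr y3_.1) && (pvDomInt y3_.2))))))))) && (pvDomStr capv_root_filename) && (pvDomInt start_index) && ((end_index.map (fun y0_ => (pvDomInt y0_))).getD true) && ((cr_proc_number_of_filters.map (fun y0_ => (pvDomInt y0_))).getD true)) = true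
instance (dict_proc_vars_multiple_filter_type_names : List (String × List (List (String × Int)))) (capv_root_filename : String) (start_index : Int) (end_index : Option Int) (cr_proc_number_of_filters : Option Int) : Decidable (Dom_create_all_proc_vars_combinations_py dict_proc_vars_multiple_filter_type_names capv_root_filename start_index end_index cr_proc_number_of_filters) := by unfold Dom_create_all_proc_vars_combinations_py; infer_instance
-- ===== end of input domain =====

-- B replaces A's per-depth recursive backtracking by one iterative backwards fold that builds every
-- combination (of every size) at once, bucketed by size; equivalence of the RETURN value is proved on
-- Pre_ (A raises IndexError outside it).

-- ===== PORT A =====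
-- The final naming loop, verbatim identical in both Python sources:
-- 'for i in range(start_index, end_index): dict[f"{root}_{start_index+i}.wav"] = flat[i - start_index]'.
-- Python raises IndexError when i - start_index ≥ len(flat); Pre_ excludes that, the port uses getD [].
def pvNameLoop (root : String) (si e : Int) (flat : List (List (String × List (String × Int)))) :
    List (String × List (String × List (String × Int))) :=
  ((PySem.List.pyRange si e 1).foldl
    (fun acc i => acc.insert (root ++ "_" ++ PySem.Int.toStr (si + i) ++ ".wav")
        ((PySem.List.pyGet? flat (i - si)).getD []))
    PySem.Dict.empty).items

-- recursive_backtrack: the 'for j in range(index, len(keys))' loop is carried as structural recursion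
-- on the suffix of keys starting at index (first iteration = the head key's elements, remaining
-- iterations = the same loop on the tail with current_combination unchanged).
def pvRbA (d : PySem.Dict String (List (List (String × Int)))) (depth : Int) :
    List String → PySem.Dict String (List (String × Int)) → List (List (String × List (String × Int)))
  | [], comb => if (comb.size : Int) = depth then [comb.items] else []
  | k :: ks, comb =>
      if (comb.size : Int) = depth then [comb.items]
      else ((d.getD k []).foldl (fun acc e => acc ++ pvRbA d depth ks (comb.insert k e)) []) ++
           pvRbA d depth ks comb

def create_all_proc_vars_combinations_py (dict_proc_vars_multiple_filter_type_names : List (String × List (List (String × Int)))) (capv_root_filename : String) (start_index : Int) (end_index : Option Int) (cr_proc_number_of_filters : Option Int) : List (String × List (String × List (String × Int))) :=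
  let d := PySem.Dict.ofList dict_proc_vars_multiple_filter_type_names
  let in_dict_keys := d.keys
  let list_all : List (List (String × List (String × Int))) :=
    match cr_proc_number_of_filters with
    | none =>
        (PySem.List.pyRange 0 (in_dict_keys.length : Int) 1).foldl
          (fun acc crt_depth => acc ++ pvRbA d (crt_depth + 1) in_dict_keys PySem.Dict.empty) []
    | some nf => [] ++ pvRbA d nf in_dict_keys PySem.Dict.empty
  let e := match end_index with
    | none => start_index + (list_all.length : Int)
    | some e => e
  pvNameLoop capv_root_filename start_index e list_all

-- ===== PORT B =====
-- combos = [{}]; for key, vals in reversed(items):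
--   combos = [{key: e, **t} for e in vals for t in combos if len(t) < cap] + combos
def pvAllCombos (cap : Int) (items : List (String × List (List (String × Int)))) :
    List (List (String × List (String × Int))) :=
  items.foldr
    (fun kv combos =>
      kv.2.flatMap (fun e =>
        (combos.filter (fun t => (t.length : Int) < cap)).map (fun t => (kv.1, e) :: t)) ++ combos)
    [[]]

def create_all_proc_vars_combinations_py_alt (dict_proc_vars_multiple_filter_type_names : List (String × List (List (String × Int)))) (capv_root_filename : String) (start_index : Int) (end_index : Option Int) (cr_proc_number_of_filters : Option Int) : List (String × List (String × List (String × Int))) :=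
  let items := (PySem.Dict.ofList dict_proc_vars_multiple_filter_type_names).items
  let cap : Int := match cr_proc_number_of_filters with
    | none => (items.length : Int)
    | some nf => nf
  let combos := pvAllCombos cap items
  let by_size : PySem.Dict Int (List (List (String × List (String × Int)))) :=
    combos.foldl (fun dd c => dd.modify (c.length : Int) [] (· ++ [c])) PySem.Dict.empty
  let flat : List (List (String × List (String × Int))) :=
    match cr_proc_number_of_filters with
    | none =>
        (PySem.List.pyRange 1 ((items.length : Int) + 1) 1).foldl
          (fun acc size => acc ++ by_size.getD size []) []
    | some nf => by_size.getD nf []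
  let e := match end_index with
    | none => start_index + (flat.length : Int)
    | some e => e
  pvNameLoop capv_root_filename start_index e flat

-- ===== PRECONDITION & SPEC =====
-- elementary symmetric counting: pvEsym k lengths = number of k-subsets of the keys weighted by
-- the product of their settings-list lengths (how many combinations use exactly k filters)
def pvEsym : Int → List Nat → Nat
  | k, [] => if k = 0 then 1 else 0
  | k, l :: ls => l * pvEsym (k - 1) ls + pvEsym k ls

def pvComboCount (dict_proc_vars_multiple_filter_type_names : List (String × List (List (String × Int)))) (cr_proc_number_of_filters : Option Int) : Nat :=
  let lengths := (PySem.Dict.ofList dict_proc_vars_multiple_filter_type_names).items.map (fun kv => kv.2.length)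
  match cr_proc_number_of_filters with
  | none => (lengths.map (· + 1)).prod - 1
  | some k => pvEsym k lengths

-- Pre_ excludes exactly the inputs on which A raises IndexError: an explicit end_index reaching
-- past the end of the combination list makes A's naming loop index out of range.
def Pre_create_all_proc_vars_combinations_py (dict_proc_vars_multiple_filter_type_names : List (String × List (List (String × Int)))) (capv_root_filename : String) (start_index : Int) (end_index : Option Int) (cr_proc_number_of_filters : Option Int) : Prop :=
  end_index.getD start_index ≤ start_index + (pvComboCount dict_proc_vars_multiple_filter_type_names cr_proc_number_of_filters : Int)
instance (dict_proc_vars_multiple_filter_type_names : List (String × List (List (String × Int)))) (capv_root_filename : String) (start_index : Int) (end_index : Option Int) (cr_proc_number_of_filters : Option Int) : Decidable (Pre_create_all_proc_vars_combinations_py dict_proc_vars_multiple_filter_type_names capv_root_filename start_index end_index cr_proc_number_of_filters) := by unfold Pre_create_all_proc_vars_combinations_py; infer_instance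

def pvWitness_create_all_proc_vars_combinations_py : (List (String × List (List (String × Int)))) × String × Int × Option Int × Option Int :=
  ([("hp", [[("cutoff", 100)], [("cutoff", 200)]]), ("pk", [[("gain", -12)]])], "mix", 0, none, none)

def Spec_create_all_proc_vars_combinations_py (dict_proc_vars_multiple_filter_type_names : List (String × List (List (String × Int)))) (capv_root_filename : String) (start_index : Int) (end_index : Option Int) (cr_proc_number_of_filters : Option Int) (out : List (String × List (String × List (String × Int)))) : Prop := out = create_all_proc_vars_combinations_py_alt dict_proc_vars_multiple_filter_type_names capv_root_filename start_index end_index cr_proc_number_of_filters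
instance (dict_proc_vars_multiple_filter_type_names : List (String × List (List (String × Int)))) (capv_root_filename : String) (start_index : Int) (end_index : Option Int) (cr_proc_number_of_filters : Option Int) (out : List (String × List (String × List (String × Int)))) : Decidable (Spec_create_all_proc_vars_combinations_py dict_proc_vars_multiple_filter_type_names capv_root_filename start_index end_index cr_proc_number_of_filters out) := by unfold Spec_create_all_proc_vars_combinations_py; infer_instance

-- ===== CLAIM (what is proved, stated in full; the proofs are below) =====
def Claim_equal_create_all_proc_vars_combinations_py : Prop := ∀ (dict_proc_vars_multiple_filter_type_names : List (String × List (List (String × Int)))) (capv_root_filename : String) (start_index : Int) (end_index : Option Int) (cr_proc_number_of_filters : Option Int), Dom_create_all_proc_vars_combinations_py dict_proc_vars_multiple_filter_type_names capv_root_filename start_index end_index cr_proc_number_of_filters → Pre_create_all_proc_vars_combinations_py dict_proc_vars_multiple_filter_type_names capv_root_filename start_index end_index cr_proc_number_of_filters → Spec_create_all_proc_vars_combinations_py dict_proc_vars_multiple_filter_type_names capv_root_filename start_index end_index cr_proc_number_of_filters (create_all_proc_vars_combinations_py dict_proc_vars_multiple_filter_type_names capv_root_filename start_index end_index cr_pr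oc_number_of_filters)

-- ===== LEMMAS AND PROOFS =====

-- proof-side reference: the UNPRUNED subset fold (pvAllCombos with the size cap dropped)
def pvAllSubsets (items : List (String × List (List (String × Int)))) :
    List (List (String × List (String × Int))) :=
  items.foldr
    (fun kv combos => kv.2.flatMap (fun e => combos.map (fun t => (kv.1, e) :: t)) ++ combos)
    [[]]

-- the pruned fold is the unpruned one filtered to sizes ≤ cap (the base [] always survives)
theorem pv_pruned_eq (cap : Int) (items : List (String × List (List (String × Int)))) :
    pvAllCombos cap items
      = (pvAllSubsets items).filter
          (fun t => t.length == 0 || decide ((t.length : Int) ≤ cap)) := by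
  induction items with
  | nil => simp [pvAllCombos, pvAllSubsets]
  | cons kv rest ih =>
    rw [show pvAllCombos cap (kv :: rest)
        = kv.2.flatMap (fun e =>
            ((pvAllCombos cap rest).filter (fun t => (t.length : Int) < cap)).map
              (fun t => (kv.1, e) :: t)) ++ pvAllCombos cap rest from rfl,
      show pvAllSubsets (kv :: rest)
        = kv.2.flatMap (fun e => (pvAllSubsets rest).map (fun t => (kv.1, e) :: t))
            ++ pvAllSubsets rest from rfl,
      List.filter_append, List.filter_flatMap, ih, List.filter_filter]
    congr 1
    apply List.flatMap_congr
    intro e _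
    rw [List.filter_map]
    congr 1
    apply List.filter_congr
    intro t _
    rw [Bool.eq_iff_iff]
    simp only [Function.comp, List.length_cons, Bool.and_eq_true,
      Bool.or_eq_true, beq_iff_eq, decide_eq_true_eq, Nat.cast_add, Nat.cast_one]
    omega

theorem pv_bucket_getD (combos : List (List (String × List (String × Int)))) (sz : Int) :
    (combos.foldl (fun dd c => dd.modify (c.length : Int) [] (· ++ [c])) PySem.Dict.empty).getD sz []
      = combos.filter (fun c => (c.length : Int) == sz) := by
  have h1 : combos.foldl (fun dd c => dd.modify (c.length : Int) [] (· ++ [c])) PySem.Dict.empty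
      = (combos.map (fun c => ((c.length : Int), c))).foldl
          (fun dd p => dd.modify p.1 [] (· ++ [p.2])) PySem.Dict.empty := by
    rw [List.foldl_map]
  rw [h1, PySem.Dict.getD_foldl_modify_append, PySem.Dict.getD_empty, List.filter_map,
    List.map_map]
  simp only [List.nil_append]
  rw [show ((fun (x : Int × List (String × List (String × Int))) => x.2) ∘ fun c => ((c.length : Int), c)) = id from rfl, List.map_id]
  rfl

theorem pv_filter_len_zero (items : List (String × List (List (String × Int)))) :
    (pvAllSubsets items).filter (fun t => t.length == 0) = [[]] := by
  induction items with
  | nil => rfl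
  | cons kv rest ih =>
    rw [show pvAllSubsets (kv :: rest) = kv.2.flatMap (fun e => (pvAllSubsets rest).map (fun t => (kv.1, e) :: t)) ++ pvAllSubsets rest from rfl]
    rw [List.filter_append, ih]
    have : (kv.2.flatMap fun e => (pvAllSubsets rest).map (fun t => (kv.1, e) :: t)).filter
        (fun t => t.length == 0) = [] := by
      rw [List.filter_eq_nil_iff]
      intro a ha
      simp only [List.mem_flatMap, List.mem_map] at ha
      obtain ⟨e, _, t, _, rfl⟩ := ha
      simp
    rw [this, List.nil_append]

theorem pv_rbA_eq (d : PySem.Dict String (List (List (String × Int)))) (hnd : d.keys.Nodup)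
    (depth : Int) (su : List (String × List (List (String × Int))))
    (comb : PySem.Dict String (List (String × Int)))
    (hsub : ∀ p ∈ su, p ∈ d.items) (hnds : (su.map Prod.fst).Nodup)
    (hfresh : ∀ p ∈ su, comb.contains p.1 = false) :
    pvRbA d depth (su.map Prod.fst) comb
      = ((pvAllSubsets su).filter (fun t => ((comb.size : Int) + t.length == depth))).map
          (fun t => comb.items ++ t) := by
  induction su generalizing comb with
  | nil =>
    by_cases hsz : (comb.size : Int) = depth
    · simp [pvRbA, pvAllSubsets, hsz]
    · simp [pvRbA, pvAllSubsets, hsz]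
  | cons kv su' ih =>
    obtain ⟨k, vs⟩ := kv
    have hACcons : pvAllSubsets ((k, vs) :: su')
        = vs.flatMap (fun e => (pvAllSubsets su').map (fun t => (k, e) :: t)) ++ pvAllSubsets su' := rfl
    have hck : comb.contains k = false := hfresh (k, vs) (List.mem_cons_self)
    have hknotin : k ∉ su'.map Prod.fst := by
      have := hnds; simp only [List.map_cons, List.nodup_cons] at this; exact this.1
    have hnds' : (su'.map Prod.fst).Nodup := by
      have := hnds; simp only [List.map_cons, List.nodup_cons] at this; exact this.2
    show pvRbA d depth (k :: su'.map Prod.fst) comb = _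
    rw [pvRbA]
    by_cases hsz : (comb.size : Int) = depth
    · rw [if_pos hsz, hACcons, List.filter_append]
      have h1 : (vs.flatMap fun e => (pvAllSubsets su').map (fun t => (k, e) :: t)).filter
          (fun t => ((comb.size : Int) + t.length == depth)) = [] := by
        rw [List.filter_eq_nil_iff]
        intro a ha
        simp only [List.mem_flatMap, List.mem_map] at ha
        obtain ⟨e, _, t, _, rfl⟩ := ha
        simp only [List.length_cons, beq_iff_eq]
        omega
      have h2 : (pvAllSubsets su').filter (fun t => ((comb.size : Int) + t.length == depth))
          = [[]] := by
        rw [List.filter_congr (q := fun t => t.length == 0), pv_filter_len_zero]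
        intro t _
        subst hsz
        rw [Bool.eq_iff_iff]
        simp only [beq_iff_eq]
        omega
      rw [h1, h2]
      simp
    · rw [if_neg hsz]
      have hv : d.getD k [] = vs :=
        PySem.Dict.getD_of_mem_items d (hsub (k, vs) (List.mem_cons_self)) hnd []
      rw [hv, PySem.List.foldl_append_eq_flatMap, List.nil_append]
      have hstep : ∀ e, pvRbA d depth (su'.map Prod.fst) (comb.insert k e)
          = ((pvAllSubsets su').filter (fun t => ((comb.size : Int) + 1 + t.length == depth))).map
              (fun t => (comb.items ++ [(k, e)]) ++ t) := by
        intro e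
        have hsi : ((comb.insert k e).size : Int) = (comb.size : Int) + 1 := by
          rw [PySem.Dict.size_insert]; simp [hck]
        have hit : (comb.insert k e).items = comb.items ++ [(k, e)] :=
          PySem.Dict.items_insert_of_not_contains comb e hck
        rw [ih (comb.insert k e)
            (fun p hp => hsub p (List.mem_cons_of_mem _ hp)) hnds'
            (fun p hp => by
              rw [PySem.Dict.contains_insert]
              have h1 : comb.contains p.1 = false := hfresh p (List.mem_cons_of_mem _ hp)
              have h2 : p.1 ≠ k := by
                intro hh
                exact hknotin (hh ▸ List.mem_map_of_mem hp)
              simp [h1, h2]),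
          hsi, hit]
      have hLHS : (vs.flatMap fun e => pvRbA d depth (su'.map Prod.fst) (comb.insert k e))
          = vs.flatMap fun e =>
              ((pvAllSubsets su').filter (fun t => ((comb.size : Int) + 1 + t.length == depth))).map
                (fun t => (comb.items ++ [(k, e)]) ++ t) :=
        List.flatMap_congr (fun e _ => hstep e)
      rw [hLHS, ih comb (fun p hp => hsub p (List.mem_cons_of_mem _ hp)) hnds'
            (fun p hp => hfresh p (List.mem_cons_of_mem _ hp)),
          hACcons, List.filter_append, List.map_append, List.filter_flatMap, List.map_flatMap]
      congr 1
      apply List.flatMap_congr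
      intro e _
      rw [List.filter_map, List.map_map]
      have hcond : ((fun t => ((comb.size : Int) + t.length == depth)) ∘ (fun t => (k, e) :: t))
          = fun t => ((comb.size : Int) + 1 + t.length == depth) := by
        funext t
        rw [Bool.eq_iff_iff]
        simp only [Function.comp, List.length_cons, beq_iff_eq]
        push_cast
        omega
      rw [hcond]
      apply List.map_congr_left
      intro t _
      simp

theorem pv_rbA_top (input : List (String × List (List (String × Int)))) (depth : Int) :
    pvRbA (PySem.Dict.ofList input) depth (PySem.Dict.ofList input).keys PySem.Dict.empty
      = (pvAllSubsets (PySem.Dict.ofList input).items).filter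
          (fun t => ((t.length : Int) == depth)) := by
  have hkeys : (PySem.Dict.ofList input).keys = (PySem.Dict.ofList input).items.map Prod.fst := rfl
  rw [hkeys, pv_rbA_eq (PySem.Dict.ofList input) (PySem.Dict.nodup_keys_ofList input) depth
      (PySem.Dict.ofList input).items PySem.Dict.empty (fun p hp => hp)
      (by rw [← hkeys]; exact PySem.Dict.nodup_keys_ofList input)
      (fun p _ => PySem.Dict.contains_empty p.1)]
  have h1 : (PySem.Dict.empty : PySem.Dict String (List (String × Int))).items = [] := rfl
  have h2 : ((PySem.Dict.empty : PySem.Dict String (List (String × Int))).size : Int) = 0 := rfl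
  rw [h1, h2]
  rw [List.filter_congr (q := fun t => ((t.length : Int) == depth))
      (fun t _ => by rw [Bool.eq_iff_iff]; simp only [beq_iff_eq]; omega)]
  simp

theorem pv_flat_eq (input : List (String × List (List (String × Int)))) (cr : Option Int) :
    (match cr with
      | none =>
          (PySem.List.pyRange 0 (((PySem.Dict.ofList input).keys.length : Nat) : Int) 1).foldl
            (fun acc crt_depth => acc ++ pvRbA (PySem.Dict.ofList input) (crt_depth + 1) (PySem.Dict.ofList input).keys PySem.Dict.empty) []
      | some nf => [] ++ pvRbA (PySem.Dict.ofList input) nf (PySem.Dict.ofList input).keys PySem.Dict.empty)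
    = (match cr with
      | none =>
          (PySem.List.pyRange 1 (((PySem.Dict.ofList input).items.length : Int) + 1) 1).foldl
            (fun acc size => acc ++ ((pvAllCombos ((PySem.Dict.ofList input).items.length : Int) (PySem.Dict.ofList input).items).foldl (fun dd c => dd.modify (c.length : Int) [] (· ++ [c])) PySem.Dict.empty).getD size []) []
      | some nf => ((pvAllCombos nf (PySem.Dict.ofList input).items).foldl (fun dd c => dd.modify (c.length : Int) [] (· ++ [c])) PySem.Dict.empty).getD nf []) := by
  have hlen : (PySem.Dict.ofList input).keys.length = (PySem.Dict.ofList input).items.length := by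
    show ((PySem.Dict.ofList input).items.map (fun p => p.1)).length = _
    exact List.length_map _
  cases cr with
  | some nf =>
    simp only [List.nil_append]
    rw [pv_rbA_top, pv_bucket_getD, pv_pruned_eq, List.filter_filter]
    apply List.filter_congr
    intro t _
    rw [Bool.eq_iff_iff]
    simp only [Bool.and_eq_true, Bool.or_eq_true, beq_iff_eq, decide_eq_true_eq]
    omega
  | none =>
    simp only []
    rw [PySem.List.foldl_append_eq_flatMap, PySem.List.foldl_append_eq_flatMap,
      List.nil_append, List.nil_append, hlen]
    rw [PySem.List.pyRange_one 0 ((PySem.Dict.ofList input).items.length : Int),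
      PySem.List.pyRange_one 1 (((PySem.Dict.ofList input).items.length : Int) + 1),
      List.flatMap_map, List.flatMap_map]
    have hn1 : (((PySem.Dict.ofList input).items.length : Int) - 0).toNat
        = (PySem.Dict.ofList input).items.length := by omega
    have hn2 : (((PySem.Dict.ofList input).items.length : Int) + 1 - 1).toNat
        = (PySem.Dict.ofList input).items.length := by omega
    rw [hn1, hn2]
    apply List.flatMap_congr
    intro j hj
    have hjlt : j < (PySem.Dict.ofList input).items.length := List.mem_range.mp hj
    rw [pv_rbA_top, pv_bucket_getD, pv_pruned_eq, List.filter_filter]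
    apply List.filter_congr
    intro t _
    rw [Bool.eq_iff_iff]
    simp only [Bool.and_eq_true, Bool.or_eq_true, beq_iff_eq, decide_eq_true_eq]
    omega

-- ===== VERDICT (by name: the statement is the Claim_ definition above) =====
theorem create_all_proc_vars_combinations_py_spec : Claim_equal_create_all_proc_vars_combinations_py := by
  intro input root si ei cr _ _
  unfold Spec_create_all_proc_vars_combinations_py
  unfold create_all_proc_vars_combinations_py create_all_proc_vars_combinations_py_alt
  have h := pv_flat_eq input cr
  cases cr with
  | none => simp only at h ⊢; rw [h]
  | some nf => simp only at h ⊢; rw [h]
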